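-- pv_equiv track=rewrite | github.com/fury93/leetcode_python3_solutions | 2490-maximum-number-of-books-you-can-take/maximum-number-of-books-you-can-take.py | maximumBooks
-- ===== SOURCE A (Python) =====
-- from typing import List
--
-- def maximumBooks(books: List[int]) -> int:
--     n = len(books)
--     dp, stack = [0] * n, []
--     for i in range(n):
--         if books[i] == 0:
--             stack.append(i)
--             continue
--         while stack:
--             j = stack[-1]
--             if books[j] >= books[i] - (i - j):
--                 stack.pop()
--             else:
--                 break
--         if not stack:
--             j = -1
--         if books[i] - i + j + 1 < 0:
--             dp[i] = books[i] * (books[i] + 1) // 2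
--         else:
--             dp[i] = (books[i] + books[i] - i + j + 1) * (i - j) // 2
--         if j >= 0:
--             dp[i] += dp[j]
--         stack.append(i)
--     return max(dp)
-- ===== SOURCE B (Python) =====
-- from typing import List
--
-- def maximumBooks(books: List[int]) -> int:
--     n = len(books)
--     dp = [0] * n
--     for i in range(n):
--         if books[i] == 0:
--             continue
--         j = i - 1
--         while j >= 0 and books[j] - j >= books[i] - i:
--             j -= 1
--         if books[i] - i + j + 1 < 0:
--             dp[i] = books[i] * (books[i] + 1) // 2
--         else:
--             dp[i] = (2 * books[i] - i + j + 1) * (i - j) // 2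
--         if j >= 0:
--             dp[i] += dp[j]
--     return max(dp)
-- ===== Notes on version B (the rewrite author's own statement) =====
-- stated objective: simpler
-- what changed: Replaced A's monotonic-stack bookkeeping by a stackless O(n^2) DP that, for each nonzero position i, re-scans backwards to the nearest previous index j with books[j]-j < books[i]-i and applies the same closed-form segment sum.
-- outside the precondition, e.g. on maximumBooks([]): A raises ValueError, B raises ValueError
import Mathlib
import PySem

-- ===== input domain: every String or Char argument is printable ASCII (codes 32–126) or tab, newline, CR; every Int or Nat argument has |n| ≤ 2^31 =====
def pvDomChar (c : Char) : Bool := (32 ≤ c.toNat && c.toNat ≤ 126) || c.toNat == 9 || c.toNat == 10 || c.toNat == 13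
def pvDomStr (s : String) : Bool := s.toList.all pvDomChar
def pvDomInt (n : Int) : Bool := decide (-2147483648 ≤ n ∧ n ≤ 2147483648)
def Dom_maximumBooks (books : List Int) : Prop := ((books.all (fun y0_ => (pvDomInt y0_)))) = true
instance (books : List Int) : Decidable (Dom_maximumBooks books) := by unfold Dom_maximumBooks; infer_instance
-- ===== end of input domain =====

-- B replaces A's monotonic stack by a stackless O(n^2) DP that re-scans backwards for
-- each i to find the boundary index (objective: simpler / alternative, not faster).

-- ===== PORT A =====
-- books[i] for an index known to be in range (Python never goes out of range here)
def pvGet (books : List Int) (i : Nat) : Int := books.getD i 0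

-- A's inner 'while stack: ... pop/break' loop
def popLoop (books : List Int) (bi : Int) (i : Nat) : List Nat → List Nat
  | [] => []
  | j :: rest =>
      if pvGet books j ≥ bi - ((i : Int) - (j : Int)) then popLoop books bi i rest
      else j :: rest

-- one iteration of A's 'for i in range(n)' loop; state = (dp so far, stack with top first)
def stepA (books : List Int) (st : List Int × List Nat) (i : Nat) : List Int × List Nat :=
  let dp := st.1
  let stack := st.2
  if pvGet books i = 0 then (dp ++ [0], i :: stack)
  else
    let bi := pvGet books i
    let stack' := popLoop books bi i stack
    let j : Int := match stack' with | [] => -1 | t :: _ => (t : Int)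
    let d := if bi - (i : Int) + j + 1 < 0 then PySem.Int.floordiv (bi * (bi + 1)) 2
             else PySem.Int.floordiv ((bi + bi - (i : Int) + j + 1) * ((i : Int) - j)) 2
    let d := if j ≥ 0 then d + dp.getD j.toNat 0 else d
    (dp ++ [d], i :: stack')

def maximumBooks (books : List Int) : Int :=
  let n := books.length
  let res := (List.range n).foldl (stepA books) ([], [])
  (PySem.List.max? res.1 (fun x => x)).getD 0

-- ===== PORT B =====
-- B's inner 'while j >= 0 and books[j] - j >= books[i] - i: j -= 1' scan; returns final j
def scanBack (books : List Int) (ki : Int) : Nat → Int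
  | 0 => -1
  | j + 1 => if pvGet books j - (j : Int) ≥ ki then scanBack books ki j else (j : Int)

-- one iteration of B's loop; state = dp so far
def stepB (books : List Int) (dp : List Int) (i : Nat) : List Int :=
  if pvGet books i = 0 then dp ++ [0]
  else
    let bi := pvGet books i
    let j := scanBack books (bi - (i : Int)) i
    let d := if bi - (i : Int) + j + 1 < 0 then PySem.Int.floordiv (bi * (bi + 1)) 2
             else PySem.Int.floordiv ((2 * bi - (i : Int) + j + 1) * ((i : Int) - j)) 2
    let d := if j ≥ 0 then d + dp.getD j.toNat 0 else d
    dp ++ [d]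

def maximumBooks_alt (books : List Int) : Int :=
  let dp := (List.range books.length).foldl (stepB books) []
  (PySem.List.max? dp (fun x => x)).getD 0

-- ===== PRECONDITION & SPEC =====
-- Pre_ excludes only the empty list, on which Python's max(dp) raises ValueError in both A and B.
def Pre_maximumBooks (books : List Int) : Prop := books ≠ []
instance (books : List Int) : Decidable (Pre_maximumBooks books) := by unfold Pre_maximumBooks; infer_instance
def pvWitness_maximumBooks : List Int := ([1, 0, 3])

def Spec_maximumBooks (books : List Int) (out : Int) : Prop := out = maximumBooks_alt books
instance (books : List Int) (out : Int) : Decidable (Spec_maximumBooks books out) := by unfold Spec_maximumBooks; infer_instance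

-- ===== CLAIM (what is proved, stated in full; the proofs are below) =====
def Claim_equal_maximumBooks : Prop := ∀ (books : List Int), Dom_maximumBooks books → Pre_maximumBooks books → Spec_maximumBooks books (maximumBooks books)

-- ===== LEMMAS AND PROOFS =====

-- key of an index: books[x] - x
def pvKey (books : List Int) (x : Nat) : Int := pvGet books x - (x : Int)

-- stack invariant maintained by A's loop before processing index m
def StackInv (books : List Int) (m : Nat) (stack : List Nat) : Prop :=
  (∀ t ∈ stack, t < m) ∧ stack.Pairwise (· > ·) ∧
  (∀ p < m, p ∉ stack → ∃ t ∈ stack, p < t ∧ pvKey books t ≤ pvKey books p)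

lemma popLoop_split (books : List Int) (bi : Int) (i : Nat) (stack : List Nat) :
    ∃ pre, stack = pre ++ popLoop books bi i stack ∧
      (∀ t ∈ pre, pvKey books t ≥ bi - (i : Int)) ∧
      (∀ j rest, popLoop books bi i stack = j :: rest → pvKey books j < bi - (i : Int)) := by
  induction stack with
  | nil => exact ⟨[], by simp [popLoop]⟩
  | cons j rest ih =>
      by_cases h : pvGet books j ≥ bi - ((i : Int) - (j : Int))
      · obtain ⟨pre, h1, h2, h3⟩ := ih
        refine ⟨j :: pre, ?_, ?_, ?_⟩
        · simp [popLoop, h, ← h1]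
        · intro t ht
          rcases List.mem_cons.mp ht with rfl | ht
          · unfold pvKey; omega
          · exact h2 t ht
        · intro j' rest' h'
          apply h3
          simpa [popLoop, h] using h'
      · refine ⟨[], by simp [popLoop, h], by simp, ?_⟩
        intro j' rest' h'
        simp only [popLoop, if_neg h] at h'
        obtain ⟨rfl, rfl⟩ := List.cons.injEq .. ▸ h'
        unfold pvKey; omega

-- if every index below m has key ≥ ki, the scan reaches -1
lemma scanBack_none (books : List Int) (ki : Int) (m : Nat)
    (h : ∀ p < m, pvKey books p ≥ ki) : scanBack books ki m = -1 := by
  induction m with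
  | zero => rfl
  | succ m ih =>
      have hm := h m (by omega)
      unfold pvKey at hm
      simp only [scanBack, if_pos (by omega : pvGet books m - (m : Int) ≥ ki)]
      exact ih fun p hp => h p (by omega)

-- if j < m has key < ki and everything strictly between has key ≥ ki, the scan stops at j
lemma scanBack_hit (books : List Int) (ki : Int) (m j : Nat)
    (hj : j < m) (hlt : pvKey books j < ki)
    (hmid : ∀ p, j < p → p < m → pvKey books p ≥ ki) :
    scanBack books ki m = (j : Int) := by
  induction m with
  | zero => omega
  | succ m ih =>
      by_cases hm : j = m
      · subst hm
        unfold pvKey at hlt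
        simp [scanBack, if_neg (by omega : ¬ pvGet books j - (j : Int) ≥ ki)]
      · have hmk := hmid m (by omega) (by omega)
        unfold pvKey at hmk
        simp only [scanBack, if_pos (by omega : pvGet books m - (m : Int) ≥ ki)]
        exact ih (by omega) fun p hp1 hp2 => hmid p hp1 (by omega)

-- under the invariant, A's post-pop stack top is exactly B's backward scan result
lemma boundary_eq (books : List Int) (i : Nat) (stack : List Nat)
    (hinv : StackInv books i stack) :
    (match popLoop books (pvGet books i) i stack with
      | [] => (-1 : Int) | t :: _ => (t : Int)) = scanBack books (pvGet books i - (i : Int)) i := by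
  obtain ⟨hlt, hpw, hwit⟩ := hinv
  obtain ⟨pre, hsplit, hpre, hhead⟩ := popLoop_split books (pvGet books i) i stack
  set ki := pvGet books i - (i : Int) with hki
  cases hst : popLoop books (pvGet books i) i stack with
  | nil =>
      -- everything was popped: every index below i has key ≥ ki
      rw [hst] at hsplit
      simp only [List.append_nil] at hsplit
      refine (scanBack_none books ki i ?_).symm
      intro p hp
      by_cases hmem : p ∈ stack
      · exact hpre p (hsplit ▸ hmem)
      · obtain ⟨t, ht, _, hk⟩ := hwit p hp hmem
        exact le_trans (hpre t (hsplit ▸ ht)) hk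
  | cons j rest =>
      have hjk : pvKey books j < ki := hhead j rest hst
      have hjlt : j < i := hlt j (by rw [hsplit, hst]; simp)
      rw [hsplit, hst] at hpw hlt hwit
      refine (scanBack_hit books ki i j hjlt hjk ?_).symm
      intro p hp1 hp2
      by_cases hmem : p ∈ pre
      · exact hpre p hmem
      by_cases hmem2 : p ∈ j :: rest
      · -- stack is strictly decreasing, so members of j :: rest are ≤ j < p: impossible
        rcases List.mem_cons.mp hmem2 with rfl | hmem3
        · omega
        · have := (List.pairwise_append.mp hpw).2.1
          have := (List.pairwise_cons.mp this).1 p hmem3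
          omega
      · obtain ⟨t, ht, htp, hk⟩ := hwit p hp2 (by simp only [List.mem_append]; tauto)
        rcases List.mem_append.mp ht with htpre | htst
        · exact le_trans (hpre t htpre) hk
        · -- t is in the kept suffix and t > p > j contradicts decreasingness
          rcases List.mem_cons.mp htst with rfl | htrest
          · omega
          · have := (List.pairwise_append.mp hpw).2.1
            have := (List.pairwise_cons.mp this).1 t htrest
            omega

-- the invariant is preserved and the two dp lists stay equal
lemma main_lemma (books : List Int) (m : Nat) :
    ((List.range m).foldl (stepA books) ([], [])).1 = (List.range m).foldl (stepB books) [] ∧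
    StackInv books m ((List.range m).foldl (stepA books) ([], [])).2 := by
  induction m with
  | zero => exact ⟨rfl, by simp, by simp, fun p hp => absurd hp (by omega)⟩
  | succ m ih =>
      obtain ⟨hdp, hinv⟩ := ih
      rw [List.range_succ, List.foldl_append, List.foldl_append]
      simp only [List.foldl_cons, List.foldl_nil]
      set st := (List.range m).foldl (stepA books) ([], []) with hst
      set dpB := (List.range m).foldl (stepB books) [] with hdpB
      obtain ⟨hbnd, hpw, hwit⟩ := hinv
      by_cases hz : pvGet books m = 0
      · refine ⟨?_, ?_, ?_, ?_⟩
        · simp [stepA, stepB, hz, hdp]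
        · intro t ht
          simp only [stepA, hz] at ht
          rcases List.mem_cons.mp ht with rfl | ht
          · omega
          · exact Nat.lt_succ_of_lt (hbnd t ht)
        · simp only [stepA, hz]
          exact List.pairwise_cons.mpr ⟨fun t ht => hbnd t ht, hpw⟩
        · simp only [stepA, hz]
          intro p hp hpmem
          have hpm : p ≠ m := fun h => hpmem (h ▸ List.mem_cons_self ..)
          have hpmem' : p ∉ st.2 := fun h => hpmem (List.mem_cons_of_mem _ h)
          obtain ⟨t, ht, h1, h2⟩ := hwit p (by omega) hpmem'
          exact ⟨t, List.mem_cons_of_mem _ ht, h1, h2⟩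
      · have hbeq := boundary_eq books m st.2 ⟨hbnd, hpw, hwit⟩
        obtain ⟨pre, hsplit, hpre, _⟩ := popLoop_split books (pvGet books m) m st.2
        refine ⟨?_, ?_, ?_, ?_⟩
        · simp only [stepA, stepB, hz, hdp, hbeq]
          split_ifs <;> ring_nf
        · intro t ht
          simp only [stepA, if_neg hz] at ht
          rcases List.mem_cons.mp ht with rfl | ht
          · omega
          · exact Nat.lt_succ_of_lt (hbnd t (by rw [hsplit]; exact List.mem_append_right _ ht))
        · simp only [stepA, if_neg hz]
          refine List.pairwise_cons.mpr ⟨fun t ht => ?_, ?_⟩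
          · exact hbnd t (by rw [hsplit]; exact List.mem_append_right _ ht)
          · rw [hsplit] at hpw
            exact (List.pairwise_append.mp hpw).2.1
        · simp only [stepA, if_neg hz]
          intro p hp hpmem
          have hpm : p ≠ m := fun h => hpmem (h ▸ List.mem_cons_self ..)
          have hpmem' : p ∉ popLoop books (pvGet books m) m st.2 :=
            fun h => hpmem (List.mem_cons_of_mem _ h)
          by_cases hmem : p ∈ st.2
          · have hppre : p ∈ pre := by
              rw [hsplit] at hmem
              rcases List.mem_append.mp hmem with h | h
              · exact h
              · exact absurd h hpmem'
            refine ⟨m, List.mem_cons_self .., hbnd p hmem, ?_⟩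
            have := hpre p hppre
            unfold pvKey at *; omega
          · obtain ⟨t, ht, h1, h2⟩ := hwit p (by omega) hmem
            rw [hsplit] at ht
            rcases List.mem_append.mp ht with htpre | htkeep
            · refine ⟨m, List.mem_cons_self .., ?_, ?_⟩
              · omega
              · have := hpre t htpre
                unfold pvKey at *; omega
            · exact ⟨t, List.mem_cons_of_mem _ htkeep, h1, h2⟩

-- ===== VERDICT (by name: the statement is the Claim_ definition above) =====
theorem maximumBooks_spec : Claim_equal_maximumBooks := by
  intro books _ _
  exact congrArg (fun l => (PySem.List.max? l (fun x => x)).getD 0)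
    (main_lemma books books.length).1
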